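-- pv_equiv track=rewrite | github.com/openharmony/testfwk_developer_test | local_coverage/keyword_registration/keyword_filter.py | update_tag
-- ===== SOURCE A (Python) =====
-- def update_tag(tag: str):
--     replace_item_list = ["lineNum", "branchNoCov", "branchCov", "lineCov",
--                          "branchNoExec", "lineNoCov", "branchExec"]
--
--     for item in replace_item_list:
--         if item in tag:
--             replace_item = (item + "Update").lower()
--             tag = tag.replace(item, replace_item)
--     return tag
-- ===== SOURCE B (Python) =====
-- def update_tag(tag: str):
--     keywords = ["lineNum", "branchNoCov", "branchCov", "lineCov",
--                 "branchNoExec", "lineNoCov", "branchExec"]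
--     pairs = [(kw, (kw + "Update").lower()) for kw in keywords]
--     out = []
--     i = 0
--     n = len(tag)
--     while i < n:
--         for kw, rep in pairs:
--             if tag.startswith(kw, i):
--                 out.append(rep)
--                 i += len(kw)
--                 break
--         else:
--             out.append(tag[i])
--             i += 1
--     return "".join(out)
-- ===== Notes on version B (the rewrite author's own statement) =====
-- stated objective: alternative
-- what changed: A makes seven sequential full-string str.replace passes (one per keyword); B precomputes the (keyword, replacement) pairs once and makes a single left-to-right scan over the string, emitting the replacement of the first keyword matching at each position; the keywords never overlap and the lowercase replacements can never form a keyword, so the results coincide.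
import Mathlib
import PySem

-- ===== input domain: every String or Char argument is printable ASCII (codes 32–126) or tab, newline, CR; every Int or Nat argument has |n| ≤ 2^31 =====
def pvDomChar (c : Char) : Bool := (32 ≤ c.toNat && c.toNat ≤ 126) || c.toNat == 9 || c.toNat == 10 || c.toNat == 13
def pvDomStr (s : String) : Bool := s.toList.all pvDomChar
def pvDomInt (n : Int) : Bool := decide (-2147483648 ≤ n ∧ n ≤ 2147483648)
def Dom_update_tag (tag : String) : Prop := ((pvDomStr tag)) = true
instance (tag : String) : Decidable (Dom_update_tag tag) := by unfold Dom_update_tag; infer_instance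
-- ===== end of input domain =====

-- B replaces A's seven sequential full-string `str.replace` passes with a single left-to-right
-- scan that rewrites the first matching keyword at each position (alternative decomposition,
-- same result).

-- ===== PORT A =====
-- literal port of A: fold the seven conditional replace passes over the tag
def update_tag (tag : String) : String :=
  (["lineNum", "branchNoCov", "branchCov", "lineCov",
    "branchNoExec", "lineNoCov", "branchExec"]).foldl
    (fun t item =>
      if PySem.Str.isIn item t then
        PySem.Str.replace t item (PySem.Str.lower (item ++ "Update"))
      else t)
    tag

-- ===== PORT B =====
-- B precomputes the (keyword, replacement) pairs once
def pvPairs : List (List Char × List Char) :=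
  (["lineNum", "branchNoCov", "branchCov", "lineCov",
    "branchNoExec", "lineNoCov", "branchExec"]).map
    (fun kw => (kw.toList, PySem.Chars.lower (kw.toList ++ "Update".toList)))

-- inner `for kw, rep in pairs: if tag.startswith(kw, i)` loop: first pair whose keyword matches here
def pvFirstMatch (K : List (List Char × List Char)) (cs : List Char) :
    Option (List Char × List Char) :=
  match K with
  | [] => none
  | p :: K' => if p.1.isPrefixOf cs then some p else pvFirstMatch K' cs

-- B's single left-to-right scan: emit the replacement and skip the keyword, else copy one char
def pvScan (K : List (List Char × List Char)) (cs : List Char) : List Char :=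
  match cs with
  | [] => []
  | c :: t =>
    match pvFirstMatch K (c :: t) with
    | some (k, r) =>
      if k.length = 0 then c :: pvScan K t   -- unreachable totality guard: all keywords are nonempty
      else r ++ pvScan K ((c :: t).drop k.length)
    | none => c :: pvScan K t
termination_by cs.length
decreasing_by all_goals
  (simp_all; try (cases k with | nil => simp_all | cons a b => simp))

def update_tag_alt (tag : String) : String :=
  String.ofList (pvScan pvPairs tag.toList)

-- ===== PRECONDITION & SPEC =====
def Spec_update_tag (tag : String) (out : String) : Prop := out = update_tag_alt tag
instance (tag : String) (out : String) : Decidable (Spec_update_tag tag out) := by unfold Spec_update_tag; infer_instance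

-- ===== CLAIM (what is proved, stated in full; the proofs are below) =====
def Claim_equal_update_tag : Prop := ∀ (tag : String), Dom_update_tag tag → Spec_update_tag tag (update_tag tag)

-- ===== LEMMAS AND PROOFS =====

-- Python's s.replace(old, new) for nonempty old, as a clean recursion (proof-side model of A's passes)
def pvRep (k r : List Char) (cs : List Char) : List Char :=
  match cs with
  | [] => []
  | c :: t =>
    if k ≠ [] ∧ k.isPrefixOf (c :: t) then r ++ pvRep k r ((c :: t).drop k.length)
    else c :: pvRep k r t
termination_by cs.length
decreasing_by
  · rename_i h
    have : k.length ≠ 0 := fun h0 => h.1 (List.length_eq_zero_iff.mp h0)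
    simp; omega
  · simp

theorem pvRep_nil (k r : List Char) : pvRep k r [] = [] := by rw [pvRep.eq_def]

theorem pvRep_cons_pos (k r : List Char) (c : Char) (t : List Char)
    (h : k ≠ [] ∧ k.isPrefixOf (c :: t)) :
    pvRep k r (c :: t) = r ++ pvRep k r ((c :: t).drop k.length) := by
  rw [pvRep.eq_def]; simp only [if_pos h]

theorem pvRep_cons_neg (k r : List Char) (c : Char) (t : List Char)
    (h : ¬ (k ≠ [] ∧ k.isPrefixOf (c :: t))) :
    pvRep k r (c :: t) = c :: pvRep k r t := by
  rw [pvRep.eq_def]; simp only [if_neg h]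

theorem pvScan_nil (K : List (List Char × List Char)) : pvScan K [] = [] := by
  rw [pvScan.eq_def]

theorem pvScan_cons_some (K : List (List Char × List Char)) (c : Char) (t : List Char)
    (k r : List Char) (hfm : pvFirstMatch K (c :: t) = some (k, r)) (hk : ¬ k.length = 0) :
    pvScan K (c :: t) = r ++ pvScan K ((c :: t).drop k.length) := by
  rw [pvScan.eq_def]; simp only [hfm, hk, if_neg, not_false_iff]

theorem pvScan_cons_none (K : List (List Char × List Char)) (c : Char) (t : List Char)
    (hfm : pvFirstMatch K (c :: t) = none) :
    pvScan K (c :: t) = c :: pvScan K t := by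
  rw [pvScan.eq_def]; simp only [hfm]

-- PySem.Chars.replace agrees with pvRep for a nonempty pattern
theorem pvGo_spec (k r : List Char) (hk : k ≠ []) :
    ∀ (fuel : Nat) (l acc : List Char), l.length ≤ fuel →
      PySem.Chars.replace.go k r fuel l acc = acc.reverse ++ pvRep k r l := by
  have hk1 : 1 ≤ k.length := by
    cases k with | nil => exact absurd rfl hk | cons a b => simp
  intro fuel
  induction fuel with
  | zero =>
    intro l acc hl
    have : l = [] := List.length_eq_zero_iff.mp (Nat.le_zero.mp hl)
    subst this
    rw [PySem.Chars.replace.go, pvRep_nil]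
  | succ n ih =>
    intro l acc hl
    match l with
    | [] =>
      rw [PySem.Chars.replace.go, pvRep_nil]
      · simp
      · omega
    | c :: t =>
      by_cases hp : k.isPrefixOf (c :: t)
      · rw [PySem.Chars.replace.go]
        simp only [hp, if_pos]
        rw [pvRep_cons_pos k r c t ⟨hk, hp⟩]
        rw [ih]
        · simp
        · simp at hl ⊢; omega
      · rw [PySem.Chars.replace.go]
        simp only [hp, Bool.false_eq_true, if_neg, not_false_iff]
        rw [pvRep_cons_neg k r c t (fun hc => hp hc.2)]
        rw [ih]
        · simp
        · simp at hl ⊢; omega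

theorem pvReplace_eq_pvRep (k r s : List Char) (hk : k ≠ []) :
    PySem.Chars.replace s k r = pvRep k r s := by
  rw [PySem.Chars.replace]
  have : k.isEmpty = false := by cases k with | nil => exact absurd rfl hk | cons a b => rfl
  rw [this]
  simpa using pvGo_spec k r hk s.length s [] le_rfl

-- a pass whose pattern does not occur is the identity
theorem pvRep_of_not_infix (k r : List Char) :
    ∀ cs, ¬ k <:+: cs → pvRep k r cs = cs := by
  intro cs
  induction cs with
  | nil => intro _; exact pvRep_nil k r
  | cons c t ih =>
    intro h
    rw [pvRep_cons_neg k r c t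
      (fun hc => h ((List.isPrefixOf_iff_prefix.mp hc.2).isInfix))]
    rw [ih fun hi => h (hi.trans (List.suffix_cons c t).isInfix)]

-- prefix totality through an append
theorem pvPrefix_cases {p u v : List Char} (h : p <+: u ++ v) : p <+: u ∨ u <+: p :=
  List.prefix_or_prefix_of_prefix h (List.prefix_append u v)

-- splitting a replace pass over an occurrence-free left part
theorem pvRep_append (k r : List Char) :
    ∀ u v, (∀ i < u.length, ¬ k <+: (u ++ v).drop i) →
      pvRep k r (u ++ v) = u ++ pvRep k r v := by
  intro u
  induction u with
  | nil => intro v _; simp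
  | cons a u' ih =>
    intro v h
    rw [List.cons_append, pvRep_cons_neg k r a (u' ++ v)
      (fun hc => h 0 (by simp) (by simpa using List.isPrefixOf_iff_prefix.mp hc.2))]
    rw [ih v fun i hi => by simpa using h (i + 1) (by simpa using Nat.succ_lt_succ hi)]
    rfl

-- splitting the scan over a match-free left part
theorem pvScan_append (K : List (List Char × List Char)) :
    ∀ u v, (∀ i < u.length, pvFirstMatch K ((u ++ v).drop i) = none) →
      pvScan K (u ++ v) = u ++ pvScan K v := by
  intro u
  induction u with
  | nil => intro v _; simp
  | cons a u' ih =>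
    intro v h
    rw [List.cons_append, pvScan_cons_none K a (u' ++ v) (by simpa using h 0 (by simp))]
    rw [ih v fun i hi => by simpa using h (i + 1) (by simpa using Nat.succ_lt_succ hi)]
    rfl

theorem pvFirstMatch_mem {K : List (List Char × List Char)} {cs : List Char}
    {p : List Char × List Char} (h : pvFirstMatch K cs = some p) :
    p ∈ K ∧ p.1 <+: cs := by
  induction K with
  | nil => simp [pvFirstMatch] at h
  | cons q K' ih =>
    rw [pvFirstMatch] at h
    by_cases hq : q.1.isPrefixOf cs
    · simp only [hq, if_pos, Option.some.injEq] at h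
      subst h
      exact ⟨List.mem_cons_self, List.isPrefixOf_iff_prefix.mp hq⟩
    · simp only [hq, Bool.false_eq_true, if_neg, not_false_iff] at h
      obtain ⟨hm, hp⟩ := ih h
      exact ⟨List.mem_cons_of_mem _ hm, hp⟩

theorem pvFirstMatch_append_some {K L : List (List Char × List Char)} {cs : List Char}
    {p : List Char × List Char} (h : pvFirstMatch K cs = some p) :
    pvFirstMatch (K ++ L) cs = some p := by
  induction K with
  | nil => simp [pvFirstMatch] at h
  | cons q K' ih =>
    rw [pvFirstMatch] at h
    rw [List.cons_append, pvFirstMatch]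
    by_cases hq : q.1.isPrefixOf cs <;> simp_all

theorem pvFirstMatch_append_none {K L : List (List Char × List Char)} {cs : List Char}
    (h : pvFirstMatch K cs = none) :
    pvFirstMatch (K ++ L) cs = pvFirstMatch L cs := by
  induction K with
  | nil => rfl
  | cons q K' ih =>
    rw [pvFirstMatch] at h
    rw [List.cons_append, pvFirstMatch]
    by_cases hq : q.1.isPrefixOf cs <;> simp_all

theorem pvFirstMatch_none_iff {K : List (List Char × List Char)} {cs : List Char} :
    pvFirstMatch K cs = none ↔ ∀ p ∈ K, ¬ p.1 <+: cs := by
  induction K with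
  | nil => simp [pvFirstMatch]
  | cons q K' ih =>
    rw [pvFirstMatch]
    by_cases hq : q.1.isPrefixOf cs
    · simp only [hq, if_pos]
      constructor
      · intro h; cases h
      · intro h; exact absurd (List.isPrefixOf_iff_prefix.mp hq) (h q List.mem_cons_self)
    · simp only [hq, Bool.false_eq_true, if_neg, not_false_iff]
      rw [ih]
      constructor
      · intro h p hp
        rcases List.mem_cons.mp hp with h1 | h1
        · subst h1; exact fun hpre => hq (List.isPrefixOf_iff_prefix.mpr hpre)
        · exact h p h1
      · intro h p hp; exact h p (List.mem_cons_of_mem _ hp)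

-- the scan never manufactures a (suffix of the) new keyword k that was not already in the input
theorem pvOcc (k : List Char) (K : List (List Char × List Char))
    (hK : ∀ p ∈ K, p.1 ≠ [])
    (hO : ∀ p ∈ K, ∀ m < k.length, ¬ (k.drop m <+: p.2) ∧ ¬ (p.2 <+: k.drop m)) :
    ∀ (n : Nat) (cs : List Char) (m : Nat), cs.length ≤ n → m < k.length →
      k.drop m <+: pvScan K cs → k.drop m <+: cs := by
  intro n
  induction n with
  | zero =>
    intro cs m hl hm hpre
    have : cs = [] := List.length_eq_zero_iff.mp (Nat.le_zero.mp hl)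
    subst this
    rw [pvScan_nil] at hpre
    exact absurd (List.drop_eq_nil_iff.mp (List.prefix_nil.mp hpre)) (by omega)
  | succ n ih =>
    intro cs m hl hm hpre
    match cs with
    | [] =>
      rw [pvScan_nil] at hpre
      exact absurd (List.drop_eq_nil_iff.mp (List.prefix_nil.mp hpre)) (by omega)
    | c :: t =>
      cases hfm : pvFirstMatch K (c :: t) with
      | some p =>
        obtain ⟨k', r'⟩ := p
        obtain ⟨hmem, _⟩ := pvFirstMatch_mem hfm
        have hk' : ¬ k'.length = 0 := fun h => hK _ hmem (List.length_eq_zero_iff.mp h)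
        rw [pvScan_cons_some K c t k' r' hfm hk'] at hpre
        rcases pvPrefix_cases hpre with h1 | h1
        · exact absurd h1 (hO _ hmem m hm).1
        · exact absurd h1 (hO _ hmem m hm).2
      | none =>
        rw [pvScan_cons_none K c t hfm] at hpre
        obtain ⟨s0, σ', hσ⟩ : ∃ s0 σ', k.drop m = s0 :: σ' := by
          cases h : k.drop m with
          | nil => exact absurd (List.drop_eq_nil_iff.mp h) (by omega)
          | cons a b => exact ⟨a, b, rfl⟩
        have hσ' : k.drop (m + 1) = σ' := by
          rw [← List.drop_drop, hσ]; rfl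
        rw [hσ] at hpre ⊢
        obtain ⟨hc, hrest⟩ := List.cons_prefix_cons.mp hpre
        subst hc
        have hσt : σ' <+: t := by
          by_cases hm1 : m + 1 < k.length
          · have hlt : t.length ≤ n := by simp at hl; omega
            have := ih t (m + 1) hlt hm1 (by rw [hσ']; exact hrest)
            rwa [hσ'] at this
          · have hnil : k.drop (m + 1) = [] := List.drop_eq_nil_iff.mpr (by omega)
            rw [hσ'] at hnil; subst hnil; exact List.nil_prefix
        exact List.cons_prefix_cons.mpr ⟨rfl, hσt⟩

-- one replace pass over the scanned string appends the new keyword to the scan's table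
theorem pvMain (k r : List Char) (K : List (List Char × List Char))
    (hk : k ≠ [])
    (hK : ∀ p ∈ K, p.1 ≠ [])
    (hA : ∀ p ∈ K, ∀ m < p.2.length, ¬ (p.2.drop m <+: k) ∧ ¬ (k <+: p.2.drop m))
    (hO : ∀ p ∈ K, ∀ m < k.length, ¬ (k.drop m <+: p.2) ∧ ¬ (p.2 <+: k.drop m))
    (hB : ∀ p ∈ K, ∀ m < k.length, 0 < m → ¬ (k.drop m <+: p.1) ∧ ¬ (p.1 <+: k.drop m)) :
    ∀ (n : Nat) (cs : List Char), cs.length ≤ n →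
      pvRep k r (pvScan K cs) = pvScan (K ++ [(k, r)]) cs := by
  have hk1 : 1 ≤ k.length := by
    cases k with | nil => exact absurd rfl hk | cons a b => simp
  intro n
  induction n with
  | zero =>
    intro cs hl
    have : cs = [] := List.length_eq_zero_iff.mp (Nat.le_zero.mp hl)
    subst this
    rw [pvScan_nil, pvScan_nil, pvRep_nil]
  | succ n ih =>
    intro cs hl
    match cs with
    | [] => rw [pvScan_nil, pvScan_nil, pvRep_nil]
    | c :: t =>
      have hlt : t.length ≤ n := by simp at hl; omega
      cases hfm : pvFirstMatch K (c :: t) with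
      | some p =>
        obtain ⟨k', r'⟩ := p
        obtain ⟨hmem, hpre⟩ := pvFirstMatch_mem hfm
        have hk'1 : 1 ≤ k'.length := by
          cases hkk : k' with
          | nil => exact absurd hkk (hK _ hmem)
          | cons a b => simp
        have hk'0 : ¬ k'.length = 0 := by omega
        rw [pvScan_cons_some K c t k' r' hfm hk'0]
        rw [pvScan_cons_some (K ++ [(k, r)]) c t k' r' (pvFirstMatch_append_some hfm) hk'0]
        rw [pvRep_append k r r' (pvScan K ((c :: t).drop k'.length))
          (fun i hi hcontra => by
            rw [List.drop_append_of_le_length (Nat.le_of_lt hi)] at hcontra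
            rcases pvPrefix_cases hcontra with h1 | h1
            · exact (hA _ hmem i hi).2 h1
            · exact (hA _ hmem i hi).1 h1)]
        rw [ih ((c :: t).drop k'.length) (by simp; omega)]
      | none =>
        by_cases hkp : k <+: (c :: t)
        · -- the new keyword matches here: the pass consumes exactly it
          obtain ⟨rest, hrest⟩ := hkp
          have hrl : rest.length ≤ n := by
            have := congrArg List.length hrest
            simp at this ⊢; omega
          have hsplit : pvScan K (c :: t) = k ++ pvScan K rest := by
            rw [← hrest]
            refine pvScan_append K k rest (fun i hi => ?_)
            rw [pvFirstMatch_none_iff]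
            intro p hp hcontra
            rcases Nat.eq_zero_or_pos i with h0 | h0
            · subst h0
              simp only [List.drop_zero] at hcontra
              rw [hrest] at hcontra
              exact (pvFirstMatch_none_iff.mp hfm) p hp hcontra
            · rw [List.drop_append_of_le_length (Nat.le_of_lt hi)] at hcontra
              rcases pvPrefix_cases hcontra with h1 | h1
              · exact (hB _ hp i hi h0).2 h1
              · exact (hB _ hp i hi h0).1 h1
          rw [hsplit]
          have hfire : pvRep k r (k ++ pvScan K rest) = r ++ pvRep k r (pvScan K rest) := by
            cases hkk : k with
            | nil => exact absurd hkk hk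
            | cons a k0 =>
              rw [List.cons_append]
              rw [pvRep_cons_pos (a :: k0) r a (k0 ++ pvScan K rest)
                ⟨by simp, by rw [List.isPrefixOf_iff_prefix, ← List.cons_append]
                             exact List.prefix_append _ _⟩]
              rw [← List.cons_append, ← hkk, List.drop_left]
          rw [hfire, ih rest hrl]
          have hkpre : k.isPrefixOf (c :: t) := List.isPrefixOf_iff_prefix.mpr ⟨rest, hrest⟩
          have hdrop : (c :: t).drop k.length = rest := by rw [← hrest, List.drop_left]
          rw [pvScan_cons_some (K ++ [(k, r)]) c t k r ?hfm2 (by omega), hdrop]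
          case hfm2 =>
            rw [pvFirstMatch_append_none hfm, pvFirstMatch]
            simp only [hkpre, if_pos]
        · -- no keyword matches at this position
          rw [pvScan_cons_none K c t hfm]
          have hfm2 : pvFirstMatch (K ++ [(k, r)]) (c :: t) = none := by
            rw [pvFirstMatch_append_none hfm, pvFirstMatch]
            have : ¬ k.isPrefixOf (c :: t) := fun h => hkp (List.isPrefixOf_iff_prefix.mp h)
            simp only [this, Bool.false_eq_true, if_neg, not_false_iff, pvFirstMatch]
          rw [pvScan_cons_none (K ++ [(k, r)]) c t hfm2]
          have hnp2 : ¬ (k ≠ [] ∧ k.isPrefixOf (c :: pvScan K t)) := by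
            rintro ⟨-, hp⟩
            apply hkp
            obtain ⟨a, k0, hkk⟩ : ∃ a k0, k = a :: k0 := by
              cases k with
              | nil => exact absurd rfl hk
              | cons a k0 => exact ⟨a, k0, rfl⟩
            have hp' := List.isPrefixOf_iff_prefix.mp hp
            rw [hkk] at hp' ⊢
            obtain ⟨hc, hk0⟩ := List.cons_prefix_cons.mp hp'
            subst hc
            have hk0' : k0 <+: t := by
              by_cases h1 : 1 < k.length
              · have hd1 : k.drop 1 = k0 := by rw [hkk]; rfl
                have := pvOcc k K hK hO t.length t 1 le_rfl h1 (by rw [hd1]; exact hk0)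
                rwa [hd1] at this
              · have hlen : k0 = [] := by
                  have hkl := congrArg List.length hkk
                  simp at hkl
                  exact List.length_eq_zero_iff.mp (by omega)
                subst hlen; exact List.nil_prefix
            exact List.cons_prefix_cons.mpr ⟨rfl, hk0'⟩
          rw [pvRep_cons_neg k r c (pvScan K t) hnp2]
          rw [ih t hlt]

theorem pvScan_no_keys : ∀ cs, pvScan ([] : List (List Char × List Char)) cs = cs := by
  intro cs
  induction cs with
  | nil => exact pvScan_nil []
  | cons c t ih => rw [pvScan_cons_none [] c t rfl, ih]

-- one A pass, on the character level
theorem pvStep_toList (t item : String) (h : item.toList ≠ []) :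
    (if PySem.Str.isIn item t then
        PySem.Str.replace t item (PySem.Str.lower (item ++ "Update"))
      else t).toList
    = pvRep item.toList (PySem.Chars.lower (item.toList ++ "Update".toList)) t.toList := by
  by_cases hin : PySem.Str.isIn item t
  · rw [if_pos hin, PySem.Str.toList_replace, PySem.Str.toList_lower, String.toList_append]
    exact pvReplace_eq_pvRep _ _ _ h
  · rw [if_neg hin]
    have hni : ¬ item.toList <:+: t.toList := fun hinf =>
      hin ((PySem.Str.isIn_iff_infix item t).mpr hinf)
    exact (pvRep_of_not_infix _ _ _ hni).symm

-- adding the (n+1)-st keyword pass on top of the n-keyword scan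
theorem pvChainStep (n : Nat) (k r : List Char)
    (hsplit : pvPairs.take (n + 1) = pvPairs.take n ++ [(k, r)])
    (hk : k ≠ [])
    (hK : ∀ p ∈ pvPairs.take n, p.1 ≠ [])
    (hA : ∀ p ∈ pvPairs.take n, ∀ m < p.2.length, ¬ (p.2.drop m <+: k) ∧ ¬ (k <+: p.2.drop m))
    (hO : ∀ p ∈ pvPairs.take n, ∀ m < k.length, ¬ (k.drop m <+: p.2) ∧ ¬ (p.2 <+: k.drop m))
    (hB : ∀ p ∈ pvPairs.take n, ∀ m < k.length, 0 < m →
            ¬ (k.drop m <+: p.1) ∧ ¬ (p.1 <+: k.drop m)) :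
    ∀ cs, pvRep k r (pvScan (pvPairs.take n) cs) = pvScan (pvPairs.take (n + 1)) cs := by
  intro cs
  rw [hsplit]
  exact pvMain k r _ hk hK hA hO hB cs.length cs le_rfl

-- ===== VERDICT (by name: the statement is the Claim_ definition above) =====
theorem update_tag_spec : Claim_equal_update_tag := by
  intro tag _
  unfold Spec_update_tag
  apply String.ext
  show (update_tag tag).toList = (update_tag_alt tag).toList
  unfold update_tag update_tag_alt
  rw [String.toList_ofList]
  simp only [List.foldl_cons, List.foldl_nil]
  rw [pvStep_toList _ "branchExec" (by decide)]
  rw [pvStep_toList _ "lineNoCov" (by decide)]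
  rw [pvStep_toList _ "branchNoExec" (by decide)]
  rw [pvStep_toList _ "lineCov" (by decide)]
  rw [pvStep_toList _ "branchCov" (by decide)]
  rw [pvStep_toList _ "branchNoCov" (by decide)]
  rw [pvStep_toList _ "lineNum" (by decide)]
  have c1 := pvChainStep 0 ("lineNum".toList)
    (PySem.Chars.lower ("lineNum".toList ++ "Update".toList))
    (by decide) (by decide) (by decide) (by decide) (by decide) (by decide)
  have c2 := pvChainStep 1 ("branchNoCov".toList)
    (PySem.Chars.lower ("branchNoCov".toList ++ "Update".toList))
    (by decide) (by decide) (by decide) (by decide) (by decide) (by decide)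
  have c3 := pvChainStep 2 ("branchCov".toList)
    (PySem.Chars.lower ("branchCov".toList ++ "Update".toList))
    (by decide) (by decide) (by decide) (by decide) (by decide) (by decide)
  have c4 := pvChainStep 3 ("lineCov".toList)
    (PySem.Chars.lower ("lineCov".toList ++ "Update".toList))
    (by decide) (by decide) (by decide) (by decide) (by decide) (by decide)
  have c5 := pvChainStep 4 ("branchNoExec".toList)
    (PySem.Chars.lower ("branchNoExec".toList ++ "Update".toList))
    (by decide) (by decide) (by decide) (by decide) (by decide) (by decide)
  have c6 := pvChainStep 5 ("lineNoCov".toList)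
    (PySem.Chars.lower ("lineNoCov".toList ++ "Update".toList))
    (by decide) (by decide) (by decide) (by decide) (by decide) (by decide)
  have c7 := pvChainStep 6 ("branchExec".toList)
    (PySem.Chars.lower ("branchExec".toList ++ "Update".toList))
    (by decide) (by decide) (by decide) (by decide) (by decide) (by decide)
  have e0 : pvScan (pvPairs.take 0) tag.toList = tag.toList := by
    rw [List.take_zero]; exact pvScan_no_keys _
  conv_lhs => rw [← e0, c1 tag.toList, c2 tag.toList, c3 tag.toList, c4 tag.toList,
    c5 tag.toList, c6 tag.toList, c7 tag.toList]
  rw [show pvPairs.take 7 = pvPairs from by decide]
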